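-- pv_equiv track=rewrite | github.com/OrivarTheOwl/Python-Programming-MOOC-2025 | Part 04/part04-37_neighbours_in_list/src/neighbours_in_list.py | longest_series_of_neighbours
-- ===== SOURCE A (Python) =====
-- def longest_series_of_neighbours(numbers : list):
--     longest = 1
--     record_longest = 1
--     for i in range(len(numbers) - 1):
--         if numbers[i] + 1 == numbers[i+1] or numbers[i] - 1 == numbers[i+1]:
--             longest += 1
--             if longest > record_longest:
--                 record_longest = longest
--         else:
--             longest = 1
--     return record_longest
-- ===== SOURCE B (Python) =====
-- def longest_series_of_neighbours(numbers: list):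
--     n = len(numbers)
--     cuts = ([0]
--             + [i + 1 for i, (a, b) in enumerate(zip(numbers, numbers[1:]))
--                if a + 1 != b and a - 1 != b]
--             + [n])
--     return max(1, max(e - s for s, e in zip(cuts, cuts[1:])))
-- ===== Notes on version B (the rewrite author's own statement) =====
-- stated objective: alternative
-- what changed: Instead of A's running run-length counter with a record, B collects the cut positions where adjacency breaks (enumerate over zipped pairs), appends the 0 and n sentinels, and returns the largest gap between consecutive cut positions, floored at A's baseline 1.
import Mathlib
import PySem

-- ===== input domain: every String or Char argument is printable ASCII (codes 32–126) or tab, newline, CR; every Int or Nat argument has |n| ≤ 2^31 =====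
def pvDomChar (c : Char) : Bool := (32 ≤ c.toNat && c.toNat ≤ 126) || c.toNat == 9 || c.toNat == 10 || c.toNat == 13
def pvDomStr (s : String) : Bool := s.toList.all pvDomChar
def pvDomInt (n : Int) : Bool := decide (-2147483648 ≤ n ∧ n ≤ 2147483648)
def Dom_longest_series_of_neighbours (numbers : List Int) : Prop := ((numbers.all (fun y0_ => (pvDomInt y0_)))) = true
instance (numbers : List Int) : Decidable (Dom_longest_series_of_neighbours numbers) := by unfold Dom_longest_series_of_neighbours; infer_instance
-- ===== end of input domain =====

-- B replaces A's running run-length counter with a cut-position view: it collects the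
-- positions where adjacency breaks and returns the largest gap between consecutive cuts
-- (floored at 1, A's baseline). Same O(n) cost; objective: alternative.

-- ===== PORT A =====
def longest_series_of_neighbours (numbers : List Int) : Int :=
  let st := (PySem.List.pyRange 0 ((numbers.length : Int) - 1) 1).foldl
    (fun (s : Int × Int) i =>
      if PySem.List.pyGetD numbers i 0 + 1 = PySem.List.pyGetD numbers (i + 1) 0 ∨
         PySem.List.pyGetD numbers i 0 - 1 = PySem.List.pyGetD numbers (i + 1) 0 then
        let l := s.1 + 1
        (l, if l > s.2 then l else s.2)
      else (1, s.2)) (1, 1)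
  st.2

-- ===== PORT B =====
def longest_series_of_neighbours_alt (numbers : List Int) : Int :=
  let n : Int := numbers.length
  let cuts : List Int :=
    [0] ++
    (((PySem.List.enumerate (numbers.zip (PySem.List.slice numbers (some 1) none)) 0).filter
        (fun q => decide (q.2.1 + 1 ≠ q.2.2) && decide (q.2.1 - 1 ≠ q.2.2))).map
      (fun q => q.1 + 1)) ++
    [n]
  -- the inner max runs over a list that is never empty (cuts has ≥ 2 elements); .getD 0 is unreachable
  max 1 ((PySem.List.max? ((cuts.zip (PySem.List.slice cuts (some 1) none)).map
            (fun p => p.2 - p.1)) (fun y => y)).getD 0)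

-- ===== PRECONDITION & SPEC =====
def Spec_longest_series_of_neighbours (numbers : List Int) (out : Int) : Prop := out = longest_series_of_neighbours_alt numbers
instance (numbers : List Int) (out : Int) : Decidable (Spec_longest_series_of_neighbours numbers out) := by unfold Spec_longest_series_of_neighbours; infer_instance

-- ===== CLAIM (what is proved, stated in full; the proofs are below) =====
def Claim_equal_longest_series_of_neighbours : Prop := ∀ (numbers : List Int), Dom_longest_series_of_neighbours numbers → Spec_longest_series_of_neighbours numbers (longest_series_of_neighbours numbers)

-- ===== LEMMAS AND PROOFS =====

-- The index loop of A reads exactly the adjacent pairs of the list.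
lemma pairs_map_range (xs : List Int) :
    (PySem.List.pyRange 0 ((xs.length : Int) - 1) 1).map
      (fun i => (PySem.List.pyGetD xs i 0, PySem.List.pyGetD xs (i + 1) 0))
      = xs.zip xs.tail := by
  apply List.ext_getElem
  · simp [PySem.List.length_pyRange_one]
  · intro k h1 h2
    rw [List.length_map, PySem.List.length_pyRange_one] at h1
    have hk : k + 1 < xs.length := by omega
    simp only [List.getElem_map, PySem.List.getElem_pyRange_one, zero_add]
    rw [PySem.List.pyGetD_eq_getElem xs 0 (by omega) (by omega),
        PySem.List.pyGetD_eq_getElem xs 0 (by omega) (by omega)]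
    simp [List.getElem_zip, List.getElem_tail]

-- adjacency of one pair, and the list of segment lengths cut at the non-adjacent pairs
def nbB (p : Int × Int) : Bool := decide (p.1 + 1 = p.2) || decide (p.1 - 1 = p.2)

def segs : List (Int × Int) → List Int
  | [] => [1]
  | p :: t =>
    if nbB p then
      match segs t with
      | [] => [1]
      | h :: r => (h + 1) :: r
    else 1 :: segs t

lemma segs_ne_nil (ps : List (Int × Int)) : segs ps ≠ [] := by
  cases ps with
  | nil => simp [segs]
  | cons p t =>
    simp only [segs]
    split
    · cases hs : segs t <;> simp
    · simp

lemma segs_head_ge_one (ps : List (Int × Int)) : 1 ≤ (segs ps).headD 0 := by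
  induction ps with
  | nil => simp [segs]
  | cons p t ih =>
    simp only [segs]
    split
    · cases hs : segs t with
      | nil => simp
      | cons h r => rw [hs] at ih; simp at ih ⊢; omega
    · simp

-- A's loop in terms of segs: the record is the running max over segment lengths.
lemma A_fold (ps : List (Int × Int)) (l r : Int) (h1 : 1 ≤ l) (h2 : l ≤ r) :
    (ps.foldl
      (fun (s : Int × Int) p =>
        if p.1 + 1 = p.2 ∨ p.1 - 1 = p.2 then
          let L := s.1 + 1
          (L, if L > s.2 then L else s.2)
        else (1, s.2)) (l, r)).2
    = (segs ps).tail.foldl max (max r (l + (segs ps).headD 0 - 1)) := by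
  induction ps generalizing l r with
  | nil => simp [segs]; omega
  | cons p t ih =>
    simp only [List.foldl_cons, segs]
    by_cases hp : p.1 + 1 = p.2 ∨ p.1 - 1 = p.2
    · have hb : nbB p = true := by rcases hp with h | h <;> simp [nbB, h]
      rw [if_pos hp, hb, if_pos rfl]
      cases hs : segs t with
      | nil => exact absurd hs (segs_ne_nil t)
      | cons h' t' =>
        have hge : 1 ≤ h' := by have := segs_head_ge_one t; rw [hs] at this; simpa using this
        have hstep : (if (l + 1 : Int) > r then l + 1 else r) = max r (l + 1) := by
          split_ifs <;> omega
        show (t.foldl _ (l + 1, if (l + 1 : Int) > r then l + 1 else r)).2 = _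
        rw [hstep, ih (l + 1) (max r (l + 1)) (by omega) (by omega), hs]
        simp only [List.headD_cons, List.tail_cons]
        congr 1
        omega
    · have hb : nbB p = false := by
        push Not at hp; simp [nbB, hp.1, hp.2]
      rw [if_neg hp, hb]
      simp only [Bool.false_eq_true, if_false]
      cases hs : segs t with
      | nil => exact absurd hs (segs_ne_nil t)
      | cons h' t' =>
        rw [ih 1 r (le_refl 1) (by omega), hs]
        simp only [List.headD_cons, List.tail_cons, List.foldl_cons]
        congr 1
        omega

-- gap list of consecutive differences
def diffs (L : List Int) : List Int := (L.zip L.tail).map (fun p => p.2 - p.1)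

lemma diffs_cons_cons (a b : Int) (L : List Int) :
    diffs (a :: b :: L) = (b - a) :: diffs (b :: L) := by
  simp [diffs]

lemma diffs_pair (a b : Int) : diffs [a, b] = [b - a] := by
  simp [diffs]

-- B's cut positions: the gaps between consecutive cuts are exactly the segment lengths.
lemma cuts_diffs (ps : List (Int × Int)) (k : Int) :
    diffs (k :: ((((PySem.List.enumerate ps k).filter
        (fun q => decide (q.2.1 + 1 ≠ q.2.2) && decide (q.2.1 - 1 ≠ q.2.2))).map
        (fun q => q.1 + 1)) ++ [k + ps.length + 1]))
    = segs ps := by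
  induction ps generalizing k with
  | nil => simp [PySem.List.enumerate_nil, diffs, segs]
  | cons p t ih =>
    rw [PySem.List.enumerate_cons]
    simp only [List.filter_cons]
    have hend : (k + ((p :: t).length : Int) + 1) = ((k + 1) + (t.length : Int) + 1) := by
      push_cast [List.length_cons]; ring
    rw [hend]
    have hIH := ih (k + 1)
    by_cases hp : p.1 + 1 = p.2 ∨ p.1 - 1 = p.2
    · have hb : ((decide (p.1 + 1 ≠ p.2) && decide (p.1 - 1 ≠ p.2)) : Bool) = false := by
        rcases hp with h | h <;> simp [h]
      have hnb : nbB p = true := by rcases hp with h | h <;> simp [nbB, h]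
      simp only [hb, Bool.false_eq_true, if_false]
      cases hs : segs t with
      | nil => exact absurd hs (segs_ne_nil t)
      | cons h' t' =>
        rw [hs] at hIH
        cases hM : (PySem.List.enumerate t (k + 1)).filter
            (fun q => decide (q.2.1 + 1 ≠ q.2.2) && decide (q.2.1 - 1 ≠ q.2.2)) with
        | nil =>
          rw [hM] at hIH
          simp only [List.map_nil, List.nil_append] at hIH ⊢
          rw [diffs_pair] at hIH ⊢
          injection hIH with hh ht
          simp only [segs, hnb, hs, ← ht]
          congr 1
          omega
        | cons q M' =>
          rw [hM] at hIH
          simp only [List.map_cons, List.cons_append] at hIH ⊢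
          rw [diffs_cons_cons] at hIH ⊢
          injection hIH with hh ht
          simp only [segs, hnb, hs]
          rw [ht]
          congr 1
          omega
    · have hb : ((decide (p.1 + 1 ≠ p.2) && decide (p.1 - 1 ≠ p.2)) : Bool) = true := by
        push Not at hp; simp [hp.1, hp.2]
      have hnb : nbB p = false := by push Not at hp; simp [nbB, hp.1, hp.2]
      simp only [hb, if_true, List.map_cons, List.cons_append]
      rw [diffs_cons_cons, hIH]
      simp only [segs, hnb, Bool.false_eq_true, if_false]
      congr 1
      omega

-- running max may be pulled out of the seed
lemma foldl_max_init (t : List Int) (a b : Int) :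
    t.foldl max (max a b) = max a (t.foldl max b) := by
  induction t generalizing b with
  | nil => rfl
  | cons c t ih => simp only [List.foldl_cons, max_assoc]; exact ih (max b c)

-- ===== VERDICT (by name: the statement is the Claim_ definition above) =====
theorem longest_series_of_neighbours_spec : Claim_equal_longest_series_of_neighbours := by
  intro numbers _
  unfold Spec_longest_series_of_neighbours
  cases numbers with
  | nil => decide
  | cons x rest =>
    simp only [longest_series_of_neighbours, longest_series_of_neighbours_alt,
      PySem.List.slice_from_one]
    -- A side: the index loop is the fold over the adjacent-pair list
    have hA := A_fold (((PySem.List.pyRange 0 (((x :: rest).length : Int) - 1) 1).map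
        (fun i => (PySem.List.pyGetD (x :: rest) i 0, PySem.List.pyGetD (x :: rest) (i + 1) 0))))
        1 1 le_rfl le_rfl
    simp only [List.foldl_map] at hA
    rw [pairs_map_range] at hA
    rw [hA]
    -- B side: rewrite the cuts list into the head-cons form of cuts_diffs at k = 0
    have hlen : ((x :: rest).length : Int)
        = 0 + (((x :: rest).zip (x :: rest).tail).length : Int) + 1 := by
      simp [List.length_zip]
    rw [hlen]
    have hgaps := cuts_diffs ((x :: rest).zip (x :: rest).tail) 0
    unfold diffs at hgaps
    simp only [List.cons_append, List.nil_append] at hgaps ⊢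
    rw [hgaps]
    cases hs : segs ((x :: rest).zip (x :: rest).tail) with
    | nil => exact absurd hs (segs_ne_nil _)
    | cons h' t' =>
      rw [PySem.List.max?_id_cons]
      simp only [List.headD_cons, List.tail_cons, Option.getD_some]
      rw [← foldl_max_init t' 1 h']
      congr 1
      omega
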